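-- pv_equiv track=rewrite | github.com/kemingy/daily-coding-problem | src/anagram_substring.py | anagram_substring
-- ===== SOURCE A (Python) =====
-- def anagram_substring(w, s):
--     indices = []
--     for pattern in (w, w[::-1]):
--         i = s.find(pattern)
--         while i >= 0:
--             indices.append(i)
--             i = s.find(pattern, i + 1)
--
--     return indices
-- ===== SOURCE B (Python) =====
-- def anagram_substring(w, s):
--     m = len(w)
--     index = {}
--     for i in range(len(s) - m + 1):
--         key = s[i:i + m]
--         index[key] = index.get(key, []) + [i]
--     return index.get(w, []) + index.get(w[::-1], [])
-- ===== Notes on version B (the rewrite author's own statement) =====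
-- stated objective: alternative
-- what changed: Instead of scanning s once per pattern with repeated s.find, B builds a hash index mapping every length-len(w) window of s to its list of start positions in one pass, and the result is just the two dictionary lookups for w and w[::-1] concatenated.
import Mathlib
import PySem

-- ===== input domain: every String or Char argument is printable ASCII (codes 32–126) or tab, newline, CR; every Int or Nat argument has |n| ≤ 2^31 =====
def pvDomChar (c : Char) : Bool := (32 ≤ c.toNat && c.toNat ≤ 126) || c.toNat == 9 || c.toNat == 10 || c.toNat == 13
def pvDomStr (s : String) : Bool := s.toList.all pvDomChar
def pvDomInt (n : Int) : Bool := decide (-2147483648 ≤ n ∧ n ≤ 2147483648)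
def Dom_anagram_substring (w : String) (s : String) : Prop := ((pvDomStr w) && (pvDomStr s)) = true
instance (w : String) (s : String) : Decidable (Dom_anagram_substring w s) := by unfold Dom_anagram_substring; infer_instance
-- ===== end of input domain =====

-- B replaces A's per-pattern repeated s.find loops by a hash index built once over all
-- length-len(w) windows of s, answered by two dictionary lookups; alternative, not faster.

-- ===== PORT A =====
-- A's 'i = s.find(pattern); while i >= 0: indices.append(i); i = s.find(pattern, i + 1)'
-- as fuel recursion; fuel = len(s)+1 bounds the number of loop iterations, so the fuel never runs out.
def pvFindLoop (s p : List Char) (fuel : Nat) (i : Int) (acc : List Int) : List Int :=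
  match fuel with
  | 0 => acc
  | Nat.succ f =>
      if 0 ≤ i then
        pvFindLoop s p f (PySem.Chars.findFrom s p (i + 1) none) (acc ++ [i])
      else acc

-- w[::-1] is Chars.slice? with step -1; the step is nonzero so it is always 'some' (.getD [] only unwraps).
def anagram_substring (w : String) (s : String) : List Int :=
  [w.toList, (PySem.Chars.slice? w.toList none none (-1)).getD []].foldl
    (fun indices pattern =>
      pvFindLoop s.toList pattern (s.toList.length + 1)
        (PySem.Chars.find s.toList pattern) indices)
    []

-- ===== PORT B =====
-- Source B: index[key] = index.get(key, []) + [i] is Dict.modify key [] (· ++ [i]).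
def anagram_substring_alt (w : String) (s : String) : List Int :=
  let m : Int := w.toList.length
  let index :=
    (PySem.List.pyRange 0 ((s.toList.length : Int) - m + 1) 1).foldl
      (fun d i =>
        d.modify (PySem.List.slice s.toList (some i) (some (i + m))) [] (· ++ [i]))
      PySem.Dict.empty
  index.getD w.toList [] ++
    index.getD ((PySem.Chars.slice? w.toList none none (-1)).getD []) []

-- ===== PRECONDITION & SPEC =====
def Spec_anagram_substring (w : String) (s : String) (out : List Int) : Prop := out = anagram_substring_alt w s
instance (w : String) (s : String) (out : List Int) : Decidable (Spec_anagram_substring w s out) := by unfold Spec_anagram_substring; infer_instance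

-- ===== CLAIM (what is proved, stated in full; the proofs are below) =====
def Claim_equal_anagram_substring : Prop := ∀ (w : String) (s : String), Dom_anagram_substring w s → Spec_anagram_substring w s (anagram_substring w s)

-- ===== LEMMAS AND PROOFS =====

-- The indices ≥ k (in increasing order) at which p occurs as a prefix of s.drop i; both programs produce this.
def pvOccFrom (p s : List Char) (k : Nat) : List Int :=
  ((List.range (s.length + 1)).filter
    (fun i => decide (k ≤ i) && decide (p <+: s.drop i))).map (Nat.cast : Nat → Int)

lemma pv_findFrom_past (s p : List Char) :
    PySem.Chars.findFrom s p ((s.length : Int) + 1) none = -1 := by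
  simp only [PySem.Chars.findFrom]
  split_ifs <;> omega

lemma pvFindLoop_neg (s p : List Char) (f : Nat) (i : Int) (acc : List Int) (hi : i < 0) :
    pvFindLoop s p f i acc = acc := by
  cases f with
  | zero => rfl
  | succ f => simp [pvFindLoop, show ¬ (0 ≤ i) by omega]

lemma pvOccFrom_past (p s : List Char) (k : Nat) (hk : s.length < k) :
    pvOccFrom p s k = [] := by
  unfold pvOccFrom
  have h : (List.range (s.length + 1)).filter
      (fun i => decide (k ≤ i) && decide (p <+: s.drop i)) = [] := by
    apply List.filter_eq_nil_iff.mpr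
    intro i hi
    simp only [List.mem_range] at hi
    simp only [Bool.and_eq_true, decide_eq_true_eq, not_and]
    omega
  rw [h, List.map_nil]

lemma pvOccFrom_empty (p s : List Char) (k : Nat) (h : ¬ p <:+: s.drop k) :
    pvOccFrom p s k = [] := by
  unfold pvOccFrom
  have h2 : (List.range (s.length + 1)).filter
      (fun i => decide (k ≤ i) && decide (p <+: s.drop i)) = [] := by
    apply List.filter_eq_nil_iff.mpr
    intro i _
    simp only [Bool.and_eq_true, decide_eq_true_eq, not_and]
    intro hki hpre
    exfalso
    apply h
    rw [← (PySem.Chars.isIn_iff_infix p (s.drop k)), ← PySem.Chars.exists_prefix_drop_iff_isIn]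
    exact ⟨i - k, by rw [List.drop_drop, show k + (i - k) = i from by omega]; exact hpre⟩
  rw [h2, List.map_nil]

lemma pv_filter_range_min (P : Nat → Bool) (k r : Nat) : ∀ n, k ≤ r → r < n → P r = true →
    (∀ i, k ≤ i → i < r → P i = false) →
    (List.range n).filter (fun i => decide (k ≤ i) && P i)
      = r :: (List.range n).filter (fun i => decide (r + 1 ≤ i) && P i) := by
  intro n
  induction n with
  | zero => intro _ h _ _; omega
  | succ n ih =>
    intro hkr hrn hPr hmin
    rw [List.range_succ, List.filter_append, List.filter_append]
    by_cases h : r < n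
    · rw [ih hkr h hPr hmin]
      have h1 : decide (k ≤ n) = true := by simp; omega
      have h2 : decide (r + 1 ≤ n) = true := by simp; omega
      simp only [List.filter_cons, List.filter_nil, h1, h2, Bool.true_and, List.cons_append]
    · have hrn' : r = n := by omega
      subst hrn'
      have hnil1 : (List.range r).filter (fun i => decide (k ≤ i) && P i) = [] := by
        apply List.filter_eq_nil_iff.mpr
        intro i hi
        simp only [List.mem_range] at hi
        by_cases hki : k ≤ i
        · simp [hmin i hki hi]
        · simp [hki]
      have hnil2 : (List.range r).filter (fun i => decide (r + 1 ≤ i) && P i) = [] := by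
        apply List.filter_eq_nil_iff.mpr
        intro i hi
        simp only [List.mem_range] at hi
        simp [show ¬ (r + 1 ≤ i) by omega]
      rw [hnil1, hnil2]
      simp [hkr, hPr]

-- peel the first occurrence r off pvOccFrom k
lemma pvOccFrom_cons (p s : List Char) (k r : Nat) (hkr : k ≤ r) (hr : r ≤ s.length)
    (hPr : p <+: s.drop r) (hmin : ∀ i, k ≤ i → i < r → ¬ p <+: s.drop i) :
    pvOccFrom p s k = (r : Int) :: pvOccFrom p s (r + 1) := by
  unfold pvOccFrom
  rw [pv_filter_range_min (fun i => decide (p <+: s.drop i)) k r (s.length + 1) hkr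
        (by omega) (by simpa using hPr) (fun i h1 h2 => by simpa using hmin i h1 h2)]
  simp

-- A's loop, started at the first occurrence ≥ k, appends exactly pvOccFrom k.
lemma pvFindLoop_spec (s p : List Char) : ∀ (fuel k : Nat) (acc : List Int),
    k ≤ s.length → s.length + 1 - k ≤ fuel →
    pvFindLoop s p fuel (PySem.Chars.findFrom s p (k : Int) none) acc = acc ++ pvOccFrom p s k := by
  intro fuel
  induction fuel with
  | zero => intro k acc hk hf; omega
  | succ f ih =>
    intro k acc hk hf
    by_cases hr : PySem.Chars.findFrom s p (k : Int) none = -1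
    · rw [hr, pvFindLoop_neg s p _ _ _ (by omega),
        pvOccFrom_empty p s k ((PySem.Chars.findFrom_natCast_eq_neg_one_iff s p k hk).mp hr),
        List.append_nil]
    · obtain ⟨hkr, hpre, hmin⟩ := PySem.Chars.findFrom_natCast_spec s p k hk hr
      set r := PySem.Chars.findFrom s p (k : Int) none with hrdef
      have hr0 : 0 ≤ r := le_trans (by exact_mod_cast Nat.zero_le k) hkr
      have hrlen : r ≤ (s.length : Int) := by
        rw [hrdef, PySem.Chars.findFrom_natCast s p k hk] at *
        have hfl := PySem.Chars.find_le_length (s.drop k) p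
        rw [List.length_drop] at hfl
        split_ifs with h
        · omega
        · omega
      have hrn : r = ((r.toNat : Nat) : Int) := by omega
      have hrn_len : r.toNat ≤ s.length := by omega
      have hkrn : k ≤ r.toNat := by omega
      rw [show pvFindLoop s p (f + 1) r acc
            = pvFindLoop s p f (PySem.Chars.findFrom s p (r + 1) none) (acc ++ [r]) by
          simp [pvFindLoop, hr0]]
      rw [pvOccFrom_cons p s k r.toNat hkrn hrn_len hpre (fun i h1 h2 => hmin i h1 h2)]
      by_cases hlast : r.toNat + 1 ≤ s.length
      · rw [show r + 1 = ((r.toNat + 1 : Nat) : Int) by omega]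
        rw [ih (r.toNat + 1) (acc ++ [r]) hlast (by omega)]
        simp [hrn.symm]
      · rw [show r + 1 = ((s.length : Int) + 1) by omega, pv_findFrom_past,
          pvFindLoop_neg s p f (-1) _ (by omega),
          pvOccFrom_past p s (r.toNat + 1) (by omega)]
        simp [hrn.symm]

lemma pvFindLoop_main (s p : List Char) (acc : List Int) :
    pvFindLoop s p (s.length + 1) (PySem.Chars.find s p) acc = acc ++ pvOccFrom p s 0 := by
  have h := pvFindLoop_spec s p (s.length + 1) 0 acc (Nat.zero_le _) (by omega)
  rwa [Nat.cast_zero, PySem.Chars.findFrom_zero] at h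

-- drop the tail of a range on which the predicate is false
lemma pv_filter_range_extend (P : Nat → Bool) (m n : Nat) (hmn : m ≤ n)
    (hP : ∀ i, m ≤ i → i < n → P i = false) :
    (List.range n).filter P = (List.range m).filter P := by
  obtain ⟨t, rfl⟩ : ∃ t, n = m + t := ⟨n - m, by omega⟩
  rw [List.range_add, List.filter_append]
  have h2 : ((List.range t).map (fun x => m + x)).filter P = [] := by
    apply List.filter_eq_nil_iff.mpr
    intro i hi
    simp only [List.mem_map, List.mem_range] at hi
    obtain ⟨j, hj, rfl⟩ := hi
    simp [hP (m + j) (by omega) (by omega)]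
  rw [h2, List.append_nil]

-- B's window index, looked up at any key p of the window length, yields exactly pvOccFrom p s 0.
lemma pvIndex_getD (s p : List Char) (m : Nat) (hp : p.length = m) :
    ((PySem.List.pyRange 0 ((s.length : Int) - (m : Int) + 1) 1).foldl
        (fun d i =>
          d.modify (PySem.List.slice s (some i) (some (i + (m : Int)))) [] (· ++ [i]))
        PySem.Dict.empty).getD p []
      = pvOccFrom p s 0 := by
  rw [PySem.List.pyRange_one, List.foldl_map]
  simp only [zero_add]
  have hwin : ∀ k : Nat,
      PySem.List.slice s (some (k : Int)) (some ((k : Int) + (m : Int))) = (s.drop k).take m :=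
    fun k => PySem.List.slice_natCast_add s k m
  -- turn the fold over k into a fold over (key, value) pairs to use getD_foldl_modify_append
  have hfold :
      (List.range ((s.length : Int) - (m : Int) + 1 - 0).toNat).foldl
        (fun d (k : Nat) =>
          d.modify (PySem.List.slice s (some (k : Int)) (some ((k : Int) + (m : Int)))) []
            (· ++ [(k : Int)])) PySem.Dict.empty
      = ((List.range ((s.length : Int) - (m : Int) + 1 - 0).toNat).map
          (fun k => ((s.drop k).take m, (k : Int)))).foldl
          (fun d pr => d.modify pr.1 [] (· ++ [pr.2])) PySem.Dict.empty := by
    rw [List.foldl_map]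
    congr 1
    funext d k
    rw [hwin k]
  rw [hfold, PySem.Dict.getD_foldl_modify_append, PySem.Dict.getD_empty, List.nil_append,
    List.filter_map, List.map_map]
  simp only [Function.comp_def]
  unfold pvOccFrom
  have hext := pv_filter_range_extend
      (fun k => ((s.drop k).take m, (k : Int)).1 == p)
      (((s.length : Int) - (m : Int) + 1 - 0).toNat) (s.length + 1)
      (by omega) ?_
  · rw [← hext]
    congr 1
    apply List.filter_congr
    intro i _
    simp only [Bool.true_and, Nat.zero_le, decide_true]
    rw [Bool.eq_iff_iff, beq_iff_eq, decide_eq_true_iff]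
    constructor
    · intro h; rw [← h]; exact List.take_prefix _ _
    · intro h; rw [← hp]; exact (List.prefix_iff_eq_take.mp h).symm
  · intro i h1 h2
    simp only [beq_eq_false_iff_ne, ne_eq]
    intro h
    have hlen := congrArg List.length h
    simp only [List.length_take, List.length_drop, hp] at hlen
    omega

-- ===== VERDICT (by name: the statement is the Claim_ definition above) =====
theorem anagram_substring_spec : Claim_equal_anagram_substring := by
  intro w s _
  unfold Spec_anagram_substring anagram_substring anagram_substring_alt
  simp only [List.foldl_cons, List.foldl_nil, PySem.Chars.slice?_eq_listSlice?,
    PySem.List.slice?_none_none_neg_one, Option.getD_some]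
  rw [pvFindLoop_main, pvFindLoop_main, List.nil_append,
    pvIndex_getD s.toList w.toList w.toList.length rfl,
    pvIndex_getD s.toList w.toList.reverse w.toList.length (List.length_reverse)]
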